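-- pv_equiv track=rewrite | github.com/glaucomori/Data_Science | Challenges/challenge06.py | checa_numero_escondido
-- ===== SOURCE A (Python) =====
-- def checa_numero_escondido(numero,numero_oculto):
--     num_int1 = numero
--     num_str1 = str(num_int1)
--     num_list_str1 = list(num_str1)
--     num_int2 = numero_oculto
--     num_str2 = str(num_int2)
--     num_list_str2 = list(num_str2)
--     while len(num_list_str1) > 0:
--         if len(num_list_str2) == 0:
--             return True
--         elif num_list_str1[-1] == num_list_str2[-1]:
--             num_list_str1.pop()
--             num_list_str2.pop()
--         else:
--             num_list_str1.pop()
--     if len(num_list_str1) == 0 and len(num_list_str2) == 0: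
--         return True
--     else:
--         return False
-- ===== SOURCE B (Python) =====
-- def checa_numero_escondido(numero, numero_oculto):
--     it = iter(str(numero))
--     return all(c in it for c in str(numero_oculto))
-- ===== Notes on version B (the rewrite author's own statement) =====
-- stated objective: idiomatic
-- what changed: Replaced the backward while-loop that pops digits off the ends of two char lists with the standard Python shared-iterator subsequence idiom scanning both strings left-to-right (all(c in it for c in s2)).
import Mathlib
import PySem

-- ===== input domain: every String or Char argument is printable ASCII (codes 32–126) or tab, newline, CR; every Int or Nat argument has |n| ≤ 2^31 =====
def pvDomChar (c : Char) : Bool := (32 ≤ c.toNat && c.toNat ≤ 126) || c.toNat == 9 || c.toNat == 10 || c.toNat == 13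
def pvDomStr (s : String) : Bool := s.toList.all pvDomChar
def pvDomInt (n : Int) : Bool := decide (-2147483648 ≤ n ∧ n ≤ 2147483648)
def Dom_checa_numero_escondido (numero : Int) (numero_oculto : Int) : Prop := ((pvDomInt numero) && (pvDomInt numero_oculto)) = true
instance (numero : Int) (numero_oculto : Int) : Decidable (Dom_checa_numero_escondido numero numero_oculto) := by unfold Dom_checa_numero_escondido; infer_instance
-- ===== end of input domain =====

-- B replaces A's backward pop-from-the-end while loop with the idiomatic shared-iterator
-- left-to-right subsequence scan; same return value, no speed claim (objective: idiomatic).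

-- ===== PORT A =====
-- A's while loop pops from the right ends of both char lists; we run it as structural
-- recursion over the two lists reversed (head = Python's last element / [-1]).
def pvLoopA : List Char → List Char → Bool
  | [], l2 => l2.isEmpty            -- loop ended with len1 == 0: True iff len2 == 0 too
  | _ :: _, [] => true              -- in-loop: len2 == 0 → return True
  | a :: l1, b :: l2 =>
      if a = b then pvLoopA l1 l2   -- last chars equal: pop both
      else pvLoopA l1 (b :: l2)     -- else: pop only list 1

def checa_numero_escondido (numero : Int) (numero_oculto : Int) : Bool :=
  pvLoopA (PySem.Int.toStr numero).toList.reverse (PySem.Int.toStr numero_oculto).toList.reverse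

-- ===== PORT B =====
-- Source B's shared iterator: 'c in it' advances the iterator past the first occurrence of c
-- (or exhausts it); pvAdvance returns the remaining iterator state, none = exhausted.
def pvAdvance (c : Char) : List Char → Option (List Char)
  | [] => none
  | a :: rest => if a = c then some rest else pvAdvance c rest

-- all(c in it for c in s2), threading the consumed-iterator state.
def pvAllIn : List Char → List Char → Bool
  | [], _ => true
  | c :: cs, it =>
      match pvAdvance c it with
      | none => false
      | some it' => pvAllIn cs it'

def checa_numero_escondido_alt (numero : Int) (numero_oculto : Int) : Bool :=
  pvAllIn (PySem.Int.toStr numero_oculto).toList (PySem.Int.toStr numero).toList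

-- ===== PRECONDITION & SPEC =====
def Spec_checa_numero_escondido (numero : Int) (numero_oculto : Int) (out : Bool) : Prop := out = checa_numero_escondido_alt numero numero_oculto
instance (numero : Int) (numero_oculto : Int) (out : Bool) : Decidable (Spec_checa_numero_escondido numero numero_oculto out) := by unfold Spec_checa_numero_escondido; infer_instance

-- ===== CLAIM (what is proved, stated in full; the proofs are below) =====
def Claim_equal_checa_numero_escondido : Prop := ∀ (numero : Int) (numero_oculto : Int), Dom_checa_numero_escondido numero numero_oculto → Spec_checa_numero_escondido numero numero_oculto (checa_numero_escondido numero numero_oculto)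

-- ===== LEMMAS AND PROOFS =====

-- Skipping a non-matching head does not change subsequence-hood.
theorem sublist_cons_of_ne (a b : Char) (l1 l2 : List Char) (h : a ≠ b) :
    List.Sublist (b :: l2) (a :: l1) ↔ List.Sublist (b :: l2) l1 := by
  constructor
  · intro h'
    rcases h' with _ | ⟨_, _⟩
    · assumption
    · exact absurd rfl h
  · intro h'; exact h'.cons a

-- A's backward greedy loop decides the subsequence relation.
theorem pvLoopA_iff : ∀ (l1 l2 : List Char), pvLoopA l1 l2 = true ↔ List.Sublist l2 l1 := by
  intro l1
  induction l1 with
  | nil =>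
    intro l2
    cases l2 with
    | nil => simp [pvLoopA]
    | cons b l2 => simp [pvLoopA]
  | cons a l1 ih =>
    intro l2
    cases l2 with
    | nil => simp [pvLoopA]
    | cons b l2 =>
      by_cases hab : a = b
      · subst hab
        simp only [pvLoopA, if_true]
        rw [ih l2]
        exact (List.cons_sublist_cons).symm
      · simp only [pvLoopA, if_neg hab]
        rw [ih (b :: l2)]
        exact (sublist_cons_of_ne a b l1 l2 hab).symm

-- B's iterator scan is (pointwise) A's loop with the arguments un-reversed.
theorem pvAllIn_eq_pvLoopA : ∀ (l1 l2 : List Char), pvAllIn l2 l1 = pvLoopA l1 l2 := by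
  intro l1
  induction l1 with
  | nil =>
    intro l2
    cases l2 with
    | nil => rfl
    | cons c cs => simp [pvAllIn, pvAdvance, pvLoopA]
  | cons a l1 ih =>
    intro l2
    cases l2 with
    | nil => rfl
    | cons c cs =>
      by_cases hac : a = c
      · simp [pvAllIn, pvAdvance, pvLoopA, hac, ih]
      · show (match pvAdvance c (a :: l1) with
              | none => false
              | some it' => pvAllIn cs it') = _
        have hadv : pvAdvance c (a :: l1) = pvAdvance c l1 := by
          simp [pvAdvance, hac]
        rw [hadv]
        have : (match pvAdvance c l1 with
                | none => false
                | some it' => pvAllIn cs it') = pvAllIn (c :: cs) l1 := rfl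
        rw [this, ih (c :: cs)]
        simp [pvLoopA, hac]

-- ===== VERDICT (by name: the statement is the Claim_ definition above) =====
theorem checa_numero_escondido_spec : Claim_equal_checa_numero_escondido := by
  intro numero numero_oculto _
  show checa_numero_escondido numero numero_oculto = checa_numero_escondido_alt numero numero_oculto
  unfold checa_numero_escondido checa_numero_escondido_alt
  rw [pvAllIn_eq_pvLoopA]
  rw [Bool.eq_iff_iff, pvLoopA_iff, pvLoopA_iff]
  exact List.reverse_sublist
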